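-- pv_equiv track=rewrite | github.com/Aasthaengg/IBMdataset | Python_codes/p03476/s170008866.py | generate_is_prime_sieve
-- ===== SOURCE A (Python) =====
-- def generate_is_prime_sieve(N):
-- 	is_prime = [True]*(N+1)
-- 	is_prime[0] = is_prime[1] = False
-- 	for p in range(2,N+1):
-- 		if is_prime[p]:
-- 			for n in range(2*p,N+1,p):
-- 				is_prime[n] = False
-- 	dummy=[x for x in is_prime]
-- 	for p in range(2,N+1):
-- 		if is_prime[p] and is_prime[(p+1)//2]:
-- 			dummy[p]=True
-- 		else:
-- 			dummy[p]=False
-- 	return dummy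
-- ===== SOURCE B (Python) =====
-- def generate_is_prime_sieve(N):
--     def is_p(n):
--         if n < 2:
--             return False
--         d = 2
--         while d * d <= n:
--             if n % d == 0:
--                 return False
--             d += 1
--         return True
--     return [p >= 2 and is_p(p) and is_p((p + 1) // 2) for p in range(N + 1)]
-- ===== Notes on version B (the rewrite author's own statement) =====
-- stated objective: alternative
-- what changed: Replaces the Eratosthenes sieve (global marking of multiples in a mutable list, then a second rewrite pass) with a per-number trial-division primality test inside a single comprehension over range(N+1).
-- outside the precondition, e.g. on generate_is_prime_sieve(0): A raises IndexError, B returns [False]; on generate_is_prime_sieve(-1): A raises IndexError, B returns []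
import Mathlib
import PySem

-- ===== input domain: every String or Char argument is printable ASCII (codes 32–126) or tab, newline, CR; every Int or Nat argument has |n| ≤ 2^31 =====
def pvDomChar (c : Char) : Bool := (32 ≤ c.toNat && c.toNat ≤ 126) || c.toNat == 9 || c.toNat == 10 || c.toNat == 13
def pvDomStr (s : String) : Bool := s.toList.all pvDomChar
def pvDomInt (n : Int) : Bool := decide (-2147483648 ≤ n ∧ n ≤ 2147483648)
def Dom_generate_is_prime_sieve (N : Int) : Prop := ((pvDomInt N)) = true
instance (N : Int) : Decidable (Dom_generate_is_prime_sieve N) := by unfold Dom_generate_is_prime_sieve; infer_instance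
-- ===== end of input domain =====

-- B replaces A's Eratosthenes marking double-loop by a per-number trial-division primality
-- test (alternative decomposition, same results); equivalence proved for N ≥ 1 (A raises
-- IndexError for N ≤ 0, where B returns the length-(N+1 clamped at 0) list).

-- ===== PORT A =====
-- inner loop: for n in range(2*p, N+1, p): is_prime[n] = False
def pvInnerA (N : Int) (arr : List Bool) (p : Int) : List Bool :=
  (PySem.List.pyRange (2 * p) (N + 1) p).foldl (fun a n => PySem.List.pySetD a n false) arr

-- one outer-loop step: if is_prime[p]: <inner loop>
def pvStepA (N : Int) (arr : List Bool) (p : Int) : List Bool :=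
  if PySem.List.pyGetD arr p false then pvInnerA N arr p else arr

-- is_prime after the sieve loops (init [True]*(N+1); is_prime[0]=is_prime[1]=False)
def pvSievedA (N : Int) : List Bool :=
  (PySem.List.pyRange 2 (N + 1) 1).foldl (pvStepA N)
    (PySem.List.pySetD (PySem.List.pySetD (PySem.List.pyRepeat [true] (N + 1)) 0 false) 1 false)

def generate_is_prime_sieve (N : Int) : List Bool :=
  let is_prime := pvSievedA N
  let dummy := is_prime.map (fun x => x)
  (PySem.List.pyRange 2 (N + 1) 1).foldl (fun d p =>
      if PySem.List.pyGetD is_prime p false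
         && PySem.List.pyGetD is_prime (PySem.Int.floordiv (p + 1) 2) false then
        PySem.List.pySetD d p true
      else
        PySem.List.pySetD d p false) dummy

-- ===== PORT B =====
-- the while loop of is_p: d runs from 2 while d*d <= n
def pvTrial (n d : Nat) : Bool :=
  if h : 2 ≤ d ∧ d * d ≤ n then
    (if n % d = 0 then false else pvTrial n (d + 1))
  else true
termination_by n + 1 - d
decreasing_by
  have : d ≤ n := le_trans (Nat.le_mul_of_pos_left d (by omega)) h.2
  omega

def pvIsP (n : Int) : Bool := if n < 2 then false else pvTrial n.toNat 2

def generate_is_prime_sieve_alt (N : Int) : List Bool :=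
  (PySem.List.pyRange 0 (N + 1) 1).map (fun p =>
    decide (2 ≤ p) && pvIsP p && pvIsP (PySem.Int.floordiv (p + 1) 2))

-- ===== PRECONDITION & SPEC =====
-- Pre_ excludes exactly N ≤ 0, where A's initial assignments is_prime[0]=is_prime[1]=False raise
-- IndexError because [True]*(N+1) has fewer than two elements.
def Pre_generate_is_prime_sieve (N : Int) : Prop := 1 ≤ N
instance (N : Int) : Decidable (Pre_generate_is_prime_sieve N) := by unfold Pre_generate_is_prime_sieve; infer_instance
def pvWitness_generate_is_prime_sieve : Int := 5

def Spec_generate_is_prime_sieve (N : Int) (out : List Bool) : Prop := out = generate_is_prime_sieve_alt N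
instance (N : Int) (out : List Bool) : Decidable (Spec_generate_is_prime_sieve N out) := by unfold Spec_generate_is_prime_sieve; infer_instance

-- ===== CLAIM (what is proved, stated in full; the proofs are below) =====
def Claim_equal_generate_is_prime_sieve : Prop := ∀ (N : Int), Dom_generate_is_prime_sieve N → Pre_generate_is_prime_sieve N → Spec_generate_is_prime_sieve N (generate_is_prime_sieve N)

-- ===== LEMMAS AND PROOFS =====

-- "k survives the sieve after outer iterations 2..b-1": k ≥ 2 and no prime below b properly divides k
def pvP (b k : Nat) : Bool :=
  decide (2 ≤ k) && decide (∀ q, q < b → Nat.Prime q → q ∣ k → q = k)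

theorem pvTrial_iff (n d : Nat) (hd : 2 ≤ d) :
    pvTrial n d = true ↔ ∀ m, d ≤ m → m * m ≤ n → ¬ m ∣ n := by
  fun_induction pvTrial n d with
  | case1 a b c =>
    simp only [Bool.false_eq_true, false_iff]
    intro hall
    exact hall a le_rfl b.2 (Nat.dvd_of_mod_eq_zero c)
  | case2 a b c ih =>
    rw [ih (by omega)]
    constructor
    · intro h m hm hmm hdvd
      rcases eq_or_lt_of_le hm with rfl | hlt
      · exact c (Nat.eq_zero_of_dvd_of_lt hdvd |> fun _ => by
          exact absurd (Nat.mod_eq_zero_of_dvd hdvd) c)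
      · exact h m hlt hmm hdvd
    · intro h m hm hmm hdvd
      exact h m (by omega) hmm hdvd
  | case3 a b =>
    constructor
    · intro _ m hm hmm hdvd
      have h1 : a * a ≤ m * m := Nat.mul_le_mul hm hm
      omega
    · intro _; rfl

theorem pvIsP_natCast (n : Nat) : pvIsP (n : Int) = decide (Nat.Prime n) := by
  unfold pvIsP
  by_cases h2 : n < 2
  · have hnp : ¬ n.Prime := fun hp => by have := hp.two_le; omega
    have : ((n:Int) < 2) := by exact_mod_cast h2
    simp [this, hnp]
  · have hlt : ¬ ((n:Int) < 2) := by exact_mod_cast h2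
    rw [if_neg hlt, Int.toNat_natCast]
    by_cases hp : n.Prime
    · rw [decide_eq_true hp]
      exact (pvTrial_iff n 2 le_rfl).mpr (fun m hm hmm hdvd => by
        rcases hp.eq_one_or_self_of_dvd m hdvd with h | h <;> nlinarith)
    · rw [decide_eq_false hp]
      cases htr : pvTrial n 2 with
      | false => rfl
      | true =>
        exfalso
        have hall := (pvTrial_iff n 2 le_rfl).mp htr
        have h1 := Nat.minFac_dvd n
        have h3 := (Nat.minFac_prime (show n ≠ 1 by omega)).two_le
        have h4 : n.minFac * n.minFac ≤ n := by
          simpa [Nat.pow_two] using Nat.minFac_sq_le_self (by omega) hp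
        exact hall n.minFac h3 h4 h1

theorem pvP_self (b : Nat) (hb : 2 ≤ b) : pvP b b = decide (Nat.Prime b) := by
  rw [pvP, ← Bool.decide_and _ _, decide_eq_decide]
  constructor
  · rintro ⟨h2, hall⟩
    by_contra hnp
    have hq := Nat.minFac_prime (show b ≠ 1 by omega)
    have hd := Nat.minFac_dvd b
    have hle : b.minFac ≤ b := Nat.le_of_dvd (by omega) hd
    have hne : b.minFac ≠ b := fun he => hnp (he ▸ hq)
    exact hne (hall _ (lt_of_le_of_ne hle hne) hq hd)
  · intro hp
    refine ⟨hp.two_le, fun q hq hqp hqd => ?_⟩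
    rcases hp.eq_one_or_self_of_dvd q hqd with h | h
    · exact absurd h (by have := hqp.two_le; omega)
    · exact h

theorem pvP_final (M k : Nat) (hk : k ≤ M) : pvP (M + 1) k = decide (Nat.Prime k) := by
  rw [pvP, ← Bool.decide_and _ _, decide_eq_decide]
  constructor
  · rintro ⟨h2, hall⟩
    by_contra hnp
    have hq := Nat.minFac_prime (show k ≠ 1 by omega)
    have hd := Nat.minFac_dvd k
    have hle : k.minFac ≤ k := Nat.le_of_dvd (by omega) hd
    have hne : k.minFac ≠ k := fun he => hnp (he ▸ hq)
    exact hne (hall _ (by omega) hq hd)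
  · intro hp
    refine ⟨hp.two_le, fun q hq hqp hqd => ?_⟩
    rcases hp.eq_one_or_self_of_dvd q hqd with h | h
    · exact absurd h (by have := hqp.two_le; omega)
    · exact h

theorem pvP_step_prime (b k : Nat) (hb : 2 ≤ b) (hp : b.Prime) :
    (if b ∣ k ∧ 2 * b ≤ k then false else pvP b k) = pvP (b + 1) k := by
  by_cases hc : b ∣ k ∧ 2 * b ≤ k
  · rw [if_pos hc]
    symm
    rw [pvP, ← Bool.decide_and _ _, decide_eq_false_iff_not]
    rintro ⟨h2, hall⟩
    have := hall b (by omega) hp hc.1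
    omega
  · rw [if_neg hc, pvP, pvP, ← Bool.decide_and, ← Bool.decide_and, decide_eq_decide]
    constructor
    · rintro ⟨h2, hall⟩
      refine ⟨h2, fun q hq hqp hqd => ?_⟩
      rcases Nat.lt_succ_iff_lt_or_eq.mp hq with h | rfl
      · exact hall q h hqp hqd
      · obtain ⟨t, rfl⟩ := hqd
        have ht : t = 1 := by
          rcases t with _ | _ | t
          · omega
          · rfl
          · exfalso; exact hc ⟨⟨t + 2, rfl⟩, by nlinarith⟩
        simp [ht]
    · rintro ⟨h2, hall⟩
      exact ⟨h2, fun q hq hqp hqd => hall q (by omega) hqp hqd⟩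

theorem pvP_step_notprime (b k : Nat) (hnp : ¬ b.Prime) : pvP b k = pvP (b + 1) k := by
  rw [pvP, pvP, ← Bool.decide_and, ← Bool.decide_and, decide_eq_decide]
  constructor
  · rintro ⟨h2, hall⟩
    refine ⟨h2, fun q hq hqp hqd => ?_⟩
    rcases Nat.lt_succ_iff_lt_or_eq.mp hq with h | rfl
    · exact hall q h hqp hqd
    · exact absurd hqp hnp
  · rintro ⟨h2, hall⟩
    exact ⟨h2, fun q hq hqp hqd => hall q (by omega) hqp hqd⟩


theorem getD_set_false (a : List Bool) (j k : Nat) :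
    (a.set j false).getD k false = if k = j then false else a.getD k false := by
  rcases eq_or_ne k j with rfl | hne
  · simp only [List.getD, List.getElem?_set]
    by_cases h : k < a.length <;> simp [h]
  · simp [List.getD, hne, Ne.symm hne]

theorem getD_set_in (a : List Bool) (j k : Nat) (v : Bool) (hj : j < a.length) :
    (a.set j v).getD k false = if k = j then v else a.getD k false := by
  rcases eq_or_ne k j with rfl | hne
  · simp [List.getD, hj]
  · simp [List.getD, hne, Ne.symm hne]

theorem foldl_setFalse (L : List Int) (a : List Bool) (hL : ∀ x ∈ L, 0 ≤ x) :
    ((L.foldl (fun a n => PySem.List.pySetD a n false) a).length = a.length) ∧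
    (∀ k : Nat, (L.foldl (fun a n => PySem.List.pySetD a n false) a).getD k false =
      if (k : Int) ∈ L then false else a.getD k false) := by
  induction L generalizing a with
  | nil => simp
  | cons x L ih =>
    have hx : 0 ≤ x := hL x (by simp)
    obtain ⟨ihlen, ihget⟩ := ih (PySem.List.pySetD a x false) (fun y hy => hL y (by simp [hy]))
    rw [List.foldl_cons]
    refine ⟨by rw [ihlen, PySem.List.length_pySetD], fun k => ?_⟩
    rw [ihget k]
    by_cases hk : (k : Int) ∈ L
    · simp [hk]
    · rw [if_neg hk, PySem.List.pySetD_of_nonneg a false hx, getD_set_false]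
      by_cases hkx : (k : Int) = x
      · have h1 : k = x.toNat := by omega
        rw [if_pos h1, if_pos (by simp [hkx] : (k:Int) ∈ x :: L)]
      · have h1 : k ≠ x.toNat := by omega
        rw [if_neg h1, if_neg (by simp [hkx, hk] : ¬ (k:Int) ∈ x :: L)]

theorem foldl_setCond (g : Int → Bool) (L : List Int) (a : List Bool)
    (hL : ∀ x ∈ L, 0 ≤ x ∧ x < (a.length : Int)) :
    ((L.foldl (fun d p => if g p then PySem.List.pySetD d p true
        else PySem.List.pySetD d p false) a).length = a.length) ∧
    (∀ k : Nat, (L.foldl (fun d p => if g p then PySem.List.pySetD d p true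
        else PySem.List.pySetD d p false) a).getD k false =
      if (k : Int) ∈ L then g k else a.getD k false) := by
  induction L generalizing a with
  | nil => simp
  | cons x L ih =>
    obtain ⟨hx0, hxl⟩ := hL x (by simp)
    have hstep : (if g x then PySem.List.pySetD a x true else PySem.List.pySetD a x false)
        = a.set x.toNat (g x) := by
      cases hgx : g x <;> simp [PySem.List.pySetD_of_nonneg a _ hx0]
    have hlen1 : (a.set x.toNat (g x)).length = a.length := by simp
    obtain ⟨ihlen, ihget⟩ := ih (a.set x.toNat (g x))
      (fun y hy => by rw [hlen1]; exact hL y (by simp [hy]))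
    rw [List.foldl_cons, hstep]
    refine ⟨by rw [ihlen, hlen1], fun k => ?_⟩
    rw [ihget k]
    by_cases hk : (k : Int) ∈ L
    · simp [hk]
    · rw [if_neg hk, getD_set_in a x.toNat k (g x) (by omega)]
      by_cases hkx : (k : Int) = x
      · have h1 : k = x.toNat := by omega
        rw [if_pos h1, if_pos (by simp [hkx] : (k:Int) ∈ x :: L), h1]
        rw [show x.toNat = ((x.toNat : Nat):Nat) from rfl]
        congr 1
        omega
      · have h1 : k ≠ x.toNat := by omega
        rw [if_neg h1, if_neg (by simp [hkx, hk] : ¬ (k:Int) ∈ x :: L)]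

theorem sieve_inv (N : Int) (hN : 1 ≤ N) (b : Nat) (hb : 2 ≤ b) (hbN : (b : Int) ≤ N + 1) :
    (((PySem.List.pyRange 2 (b : Int) 1).foldl (pvStepA N)
      (PySem.List.pySetD (PySem.List.pySetD (PySem.List.pyRepeat [true] (N + 1)) 0 false) 1 false)).length
        = (N + 1).toNat) ∧
    (∀ k : Nat, k ≤ N.toNat →
      ((PySem.List.pyRange 2 (b : Int) 1).foldl (pvStepA N)
        (PySem.List.pySetD (PySem.List.pySetD (PySem.List.pyRepeat [true] (N + 1)) 0 false) 1 false)).getD k false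
          = pvP b k) := by
  induction b, hb using Nat.le_induction with
  | base =>
    rw [show ((2:Nat):Int) = 2 by norm_num, PySem.List.pyRange_one_eq_nil le_rfl, List.foldl_nil]
    rw [PySem.List.pyRepeat_singleton,
        PySem.List.pySetD_of_nonneg _ false (by norm_num),
        PySem.List.pySetD_of_nonneg _ false (by norm_num)]
    have hlen : ((((List.replicate (N+1).toNat true).set (0:Int).toNat false).set (1:Int).toNat false)).length = (N+1).toNat := by
      simp
    refine ⟨hlen, fun k hk => ?_⟩
    have hklen : k < (N+1).toNat := by omega
    rw [show ((1:Int).toNat) = 1 from rfl, show ((0:Int).toNat) = 0 from rfl]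
    rw [getD_set_false, getD_set_false]
    have hrep : (List.replicate (N+1).toNat true).getD k false = true := by
      rw [List.getD_eq_getElem _ _ (by simpa using hklen)]
      simp
    have hP : pvP 2 k = decide (2 ≤ k) := by
      rw [pvP]
      have : (∀ q, q < 2 → Nat.Prime q → q ∣ k → q = k) := by
        intro q hq hqp _
        exfalso; have := hqp.two_le; omega
      rw [decide_eq_true this, Bool.and_true]
    rw [hP]
    by_cases h1 : k = 1
    · simp [h1]
    · by_cases h0 : k = 0
      · simp [h0]
      · rw [if_neg h1, if_neg h0, hrep]
        symm; exact decide_eq_true (by omega)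
  | succ b hb2 ih =>
    have hbN' : (b : Int) ≤ N + 1 := by push_cast at hbN ⊢; omega
    have hbM : b ≤ N.toNat := by omega
    obtain ⟨hlen, hget⟩ := ih hbN'
    have hsplit : PySem.List.pyRange 2 ((b:Nat)+1 : Int) 1
        = PySem.List.pyRange 2 (b : Int) 1 ++ [(b : Int)] :=
      PySem.List.pyRange_one_succ_right (by exact_mod_cast hb2)
    rw [show (((b+1:Nat)):Int) = ((b:Int) + 1) by push_cast; ring, hsplit, List.foldl_append,
        List.foldl_cons, List.foldl_nil]
    set arrb := (PySem.List.pyRange 2 (b : Int) 1).foldl (pvStepA N)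
      (PySem.List.pySetD (PySem.List.pySetD (PySem.List.pyRepeat [true] (N + 1)) 0 false) 1 false) with harrb
    have hgetb : PySem.List.pyGetD arrb (b : Int) false = pvP b b := by
      rw [PySem.List.pyGetD_natCast]
      exact hget b hbM
    rw [pvStepA, hgetb, pvP_self b hb2]
    by_cases hp : Nat.Prime b
    · rw [decide_eq_true hp, if_pos rfl, pvInnerA]
      have hLpos : ∀ x ∈ PySem.List.pyRange (2 * (b:Int)) (N + 1) (b:Int), 0 ≤ x := by
        intro x hx
        rw [PySem.List.mem_pyRange_iff_of_pos (by exact_mod_cast (by omega : 0 < b))] at hx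
        omega
      obtain ⟨flen, fget⟩ := foldl_setFalse _ arrb hLpos
      refine ⟨by rw [flen, hlen], fun k hk => ?_⟩
      rw [fget k]
      have hmem : ((k : Int) ∈ PySem.List.pyRange (2 * (b:Int)) (N + 1) (b:Int))
          ↔ (b ∣ k ∧ 2 * b ≤ k) := by
        rw [PySem.List.mem_pyRange_iff_of_pos (by exact_mod_cast (by omega : 0 < b))]
        constructor
        · rintro ⟨h1, h2, h3⟩
          have h2b : (b:Int) ∣ 2 * (b:Int) := ⟨2, by ring⟩
          have hdvd : (b:Int) ∣ (k:Int) := by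
            simpa using dvd_add h3 h2b
          exact ⟨by exact_mod_cast hdvd, by omega⟩
        · rintro ⟨h1, h2⟩
          have h2b : (b:Int) ∣ 2 * (b:Int) := ⟨2, by ring⟩
          have hdvd : (b:Int) ∣ (k:Int) := by exact_mod_cast h1
          exact ⟨by omega, by omega, dvd_sub hdvd h2b⟩
      rw [hget k hk, ← pvP_step_prime b k hb2 hp]
      by_cases hc : b ∣ k ∧ 2 * b ≤ k
      · rw [if_pos (hmem.mpr hc), if_pos hc]
      · rw [if_neg (fun h => hc (hmem.mp h)), if_neg hc]
    · rw [decide_eq_false hp, if_neg (by simp), harrb]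
      exact ⟨hlen, fun k hk => by rw [hget k hk, pvP_step_notprime b k hp]⟩

theorem pvSievedA_spec (N : Int) (hN : 1 ≤ N) :
    (pvSievedA N).length = (N + 1).toNat ∧
    (∀ k : Nat, k ≤ N.toNat → (pvSievedA N).getD k false = decide (Nat.Prime k)) := by
  have hcast : ((N.toNat + 1 : Nat) : Int) = N + 1 := by omega
  obtain ⟨hlen, hget⟩ := sieve_inv N hN (N.toNat + 1) (by omega) (by omega)
  rw [hcast] at hlen hget
  exact ⟨hlen, fun k hk => by rw [pvSievedA, hget k hk, pvP_final N.toNat k hk]⟩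

theorem main_equal (N : Int) (hN : 1 ≤ N) :
    generate_is_prime_sieve N = generate_is_prime_sieve_alt N := by
  obtain ⟨slen, sget⟩ := pvSievedA_spec N hN
  rw [generate_is_prime_sieve, generate_is_prime_sieve_alt]
  simp only [List.map_id']
  have hLrange : ∀ x ∈ PySem.List.pyRange 2 (N + 1) 1,
      0 ≤ x ∧ x < ((pvSievedA N).length : Int) := by
    intro x hx
    rw [PySem.List.mem_pyRange_one] at hx
    rw [slen]
    omega
  obtain ⟨flen, fget⟩ := foldl_setCond
    (fun p => PySem.List.pyGetD (pvSievedA N) p false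
      && PySem.List.pyGetD (pvSievedA N) (PySem.Int.floordiv (p + 1) 2) false)
    (PySem.List.pyRange 2 (N + 1) 1) (pvSievedA N) hLrange
  apply List.ext_getElem
  · rw [flen, slen, List.length_map, PySem.List.length_pyRange_one]
    omega
  · intro k hk1 hk2
    have hkM : k < (N + 1).toNat := by rw [flen, slen] at hk1; exact hk1
    have hkN : k ≤ N.toNat := by omega
    rw [← List.getD_eq_getElem _ false hk1, fget k]
    rw [List.getElem_map, PySem.List.getElem_pyRange_one, zero_add]
    have hfd : PySem.Int.floordiv ((k:Int) + 1) 2 = (((k + 1) / 2 : Nat) : Int) := by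
      exact_mod_cast PySem.Int.floordiv_natCast (k + 1) 2
    have hhalf : (k + 1) / 2 ≤ N.toNat := by omega
    rw [hfd, pvIsP_natCast, pvIsP_natCast]
    by_cases h2 : 2 ≤ k
    · rw [if_pos (by rw [PySem.List.mem_pyRange_one]; omega)]
      rw [PySem.List.pyGetD_natCast, PySem.List.pyGetD_natCast, sget k hkN, sget _ hhalf]
      rw [decide_eq_true (show (2:Int) ≤ (k:Int) by omega), Bool.true_and]
    · rw [if_neg (by rw [PySem.List.mem_pyRange_one]; omega)]
      rw [decide_eq_false (show ¬ (2:Int) ≤ (k:Int) by omega), Bool.false_and, Bool.false_and]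
      rw [sget k hkN, decide_eq_false (fun hp : Nat.Prime k => by have := hp.two_le; omega)]

-- ===== VERDICT (by name: the statement is the Claim_ definition above) =====
theorem generate_is_prime_sieve_spec : Claim_equal_generate_is_prime_sieve := by
  intro N _ hN
  show generate_is_prime_sieve N = generate_is_prime_sieve_alt N
  exact main_equal N hN
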